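-- pv_equiv track=rewrite | github.com/Maksymilianx/Codewars_exercises | Exercises/Barista_Problem.py | barista
-- ===== SOURCE A (Python) =====
-- def barista(coffees):
--     sorted_coffees = sorted(coffees)
--     previous_coffee = sorted_coffees[0]
--     total = 0
--     for x in sorted_coffees[1:]:
--         total += previous_coffee
--         previous_coffee = previous_coffee + 2 + x
--     return total + previous_coffee
-- ===== SOURCE B (Python) =====
-- def barista(coffees):
--     s = sorted(coffees)
--     n = len(s)
--     return n * (n - 1) + sum((n - i) * x for i, x in enumerate(s))
-- ===== Notes on version B (the rewrite author's own statement) =====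
-- stated objective: alternative
-- what changed: Replaces A's rolling prev/total accumulator loop over the sorted list by a closed-form rank-weighted sum: n*(n-1) + sum((n-i)*x) over the sorted list.
import Mathlib
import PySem

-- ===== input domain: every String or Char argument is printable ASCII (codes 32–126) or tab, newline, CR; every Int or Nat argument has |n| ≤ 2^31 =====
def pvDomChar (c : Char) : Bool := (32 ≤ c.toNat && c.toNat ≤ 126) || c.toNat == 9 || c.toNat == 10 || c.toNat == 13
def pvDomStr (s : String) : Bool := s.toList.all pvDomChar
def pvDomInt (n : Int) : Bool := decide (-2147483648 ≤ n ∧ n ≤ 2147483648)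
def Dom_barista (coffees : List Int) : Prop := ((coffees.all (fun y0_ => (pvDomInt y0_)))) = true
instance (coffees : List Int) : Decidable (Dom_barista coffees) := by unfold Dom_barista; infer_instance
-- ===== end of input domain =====

-- B replaces A's rolling prev/total accumulator by a closed-form rank-weighted sum over the
-- sorted list (alternative decomposition, same asymptotic cost).

-- ===== PORT A =====
-- total/previous_coffee loop over sorted_coffees[1:]; sorted_coffees[0] raises on [] (excluded by Pre_).
def barista (coffees : List Int) : Int :=
  let sorted_coffees := PySem.List.sorted coffees id false
  let previous_coffee := PySem.List.pyGetD sorted_coffees 0 0   -- sorted_coffees[0]; in range under Pre_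
  let st := (PySem.List.slice sorted_coffees (some 1) none).foldl
      (fun (st : Int × Int) x => (st.1 + st.2, st.2 + 2 + x)) ((0 : Int), previous_coffee)
  st.1 + st.2

-- ===== PORT B =====
def barista_alt (coffees : List Int) : Int :=
  let s := PySem.List.sorted coffees id false
  let n : Int := s.length
  n * (n - 1) + (PySem.List.enumerate s 0).foldl (fun acc ix => acc + (n - ix.1) * ix.2) 0

-- ===== PRECONDITION & SPEC =====
-- Pre_ excludes only the empty list, on which A raises IndexError at sorted_coffees[0].
def Pre_barista (coffees : List Int) : Prop := coffees ≠ []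
instance (coffees : List Int) : Decidable (Pre_barista coffees) := by unfold Pre_barista; infer_instance
def pvWitness_barista : List Int := [3, 1, 2]

def Spec_barista (coffees : List Int) (out : Int) : Prop := out = barista_alt coffees
instance (coffees : List Int) (out : Int) : Decidable (Spec_barista coffees out) := by unfold Spec_barista; infer_instance

-- ===== CLAIM (what is proved, stated in full; the proofs are below) =====
def Claim_equal_barista : Prop := ∀ (coffees : List Int), Dom_barista coffees → Pre_barista coffees → Spec_barista coffees (barista coffees)

-- ===== LEMMAS AND PROOFS =====

-- Σ_j (m - j) * l_j, the rank-weighted sum with top weight m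
def wsum (m : Int) : List Int → Int
  | [] => 0
  | x :: l => m * x + wsum (m - 1) l

theorem afold_eq (l : List Int) : ∀ (t p : Int),
    (l.foldl (fun (st : Int × Int) x => (st.1 + st.2, st.2 + 2 + x)) (t, p)).1 +
    (l.foldl (fun (st : Int × Int) x => (st.1 + st.2, st.2 + 2 + x)) (t, p)).2
    = t + ((l.length : Int) + 1) * p + (l.length : Int) * ((l.length : Int) + 1) + wsum l.length l := by
  induction l with
  | nil => intro t p; simp [wsum]
  | cons x l ih =>
    intro t p
    simp only [List.foldl_cons, List.length_cons, wsum]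
    rw [ih]
    push_cast
    rw [show ((l.length : Int) + 1 - 1) = (l.length : Int) by ring]
    ring

theorem bfold_eq (l : List Int) : ∀ (k acc n : Int),
    (PySem.List.enumerate l k).foldl (fun acc ix => acc + (n - ix.1) * ix.2) acc
    = acc + wsum (n - k) l := by
  induction l with
  | nil => intro k acc n; simp [PySem.List.enumerate_nil, wsum]
  | cons x l ih =>
    intro k acc n
    rw [PySem.List.enumerate_cons, List.foldl_cons, ih]
    simp only [wsum]
    rw [show (n - (k + 1)) = (n - k - 1) by ring]
    ring

-- ===== VERDICT =====
theorem barista_spec : Claim_equal_barista := by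
  intro coffees _ hpre
  unfold Spec_barista barista barista_alt
  have hne : PySem.List.sorted coffees id false ≠ [] := by
    intro h
    exact hpre ((h ▸ PySem.List.sorted_perm coffees id false).symm.eq_nil)
  obtain ⟨h, t, hs⟩ := List.exists_cons_of_ne_nil hne
  simp only [hs, PySem.List.slice_from_one, List.tail_cons, PySem.List.pyGetD_zero_cons,
    List.length_cons]
  rw [afold_eq, bfold_eq]
  simp only [wsum, sub_zero]
  push_cast
  rw [show ((t.length : Int) + 1 - 1) = (t.length : Int) by ring]
  ring
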